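-- pv_equiv track=rewrite | github.com/z-gong/mstk | mstk/chem/formula.py | _extract_chars
-- ===== SOURCE A (Python) =====
-- def _extract_chars(formula):
--     chars = []
--     i = 0
--     while i < len(formula):
--         c = formula[i]
--         if c.isupper() or c == '+' or c == '-':
--             chars.append(c)
--             i += 1
--             while i < len(formula):
--                 if formula[i].islower():
--                     chars[-1] += formula[i]
--                     i += 1
--                 else:
--                     break
--         elif c.isdigit():
--             chars.append(c)
--             i += 1
--             while i < len(formula):
--                 if formula[i].isdigit():
--                     chars[-1] += formula[i]
--                     i += 1
--                 else:
--                     break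
--         elif c == '(' or c == ')':
--             chars.append(c)
--             i += 1
--         else:
--             raise Exception('Invalid character: %s' % c)
--
--     if chars[0].isdigit():
--         raise Exception('Invalid formula')
--     if chars.count('(') != chars.count(')'):
--         raise Exception('Unmatched brackets')
--     return chars
-- ===== SOURCE B (Python) =====
-- import re
--
-- # Token grammar of a formula: an element/charge symbol with optional lowercase
-- # tail, a run of digits, or a bracket.
-- _TOKEN = re.compile(r'[A-Z+\-][a-z]*|[0-9]+|[()]')
--
--
-- def _extract_chars(formula):
--     chars = []
--     pos = 0
--     while pos < len(formula):
--         m = _TOKEN.match(formula, pos)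
--         if m is None:
--             raise Exception('Invalid character: %s' % formula[pos])
--         chars.append(m.group())
--         pos = m.end()
--     if chars[0].isdigit():
--         raise Exception('Invalid formula')
--     if chars.count('(') != chars.count(')'):
--         raise Exception('Unmatched brackets')
--     return chars
-- ===== Notes on version B (the rewrite author's own statement) =====
-- stated objective: idiomatic
-- what changed: Replaces the hand-written character-by-character state machine (nested while loops mutating chars[-1]) with a single regex match-and-advance loop over the token grammar [A-Z+\-][a-z]*|[0-9]+|[()].
import Mathlib
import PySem

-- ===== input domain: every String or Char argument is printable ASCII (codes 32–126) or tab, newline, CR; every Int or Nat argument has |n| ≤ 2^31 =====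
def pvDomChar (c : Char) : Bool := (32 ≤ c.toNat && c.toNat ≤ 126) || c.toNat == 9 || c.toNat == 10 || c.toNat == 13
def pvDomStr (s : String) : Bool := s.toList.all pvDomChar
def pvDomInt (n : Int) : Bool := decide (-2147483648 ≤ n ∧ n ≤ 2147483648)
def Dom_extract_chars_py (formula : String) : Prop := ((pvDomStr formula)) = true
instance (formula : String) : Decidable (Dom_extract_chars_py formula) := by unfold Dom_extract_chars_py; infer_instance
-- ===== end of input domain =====

-- B replaces A's hand-written character state machine (nested while loops mutating
-- chars[-1]) by a single regex match-and-advance loop (idiomatic); raise paths of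
-- both Pythons are modelled as `none`/`[]` and excluded by Pre_.

-- ===== PORT A =====
-- chars[-1] += c  (no-op on an empty list; A never reaches it with an empty list)
def pvAddLast : List String → Char → List String
  | [], _ => []
  | [s], c => [s.push c]
  | s :: t :: r, c => s :: pvAddLast (t :: r) c

-- A's first inner while: absorb lowercase letters into chars[-1]
def pvAbsorbLower : List String → List Char → List String × List Char
  | chars, [] => (chars, [])
  | chars, c :: cs =>
    if PySem.Chars.islower c then pvAbsorbLower (pvAddLast chars c) cs else (chars, c :: cs)

-- A's second inner while: absorb digits into chars[-1]
def pvAbsorbDigit : List String → List Char → List String × List Char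
  | chars, [] => (chars, [])
  | chars, c :: cs =>
    if PySem.Chars.isdigit c then pvAbsorbDigit (pvAddLast chars c) cs else (chars, c :: cs)

-- termination helpers for pvALoop (cited in decreasing_by)
theorem pvAbsorbLower_len : ∀ (chars : List String) (cs : List Char),
    (pvAbsorbLower chars cs).2.length ≤ cs.length := by
  intro chars cs
  induction cs generalizing chars with
  | nil => simp [pvAbsorbLower]
  | cons c cs ih =>
    simp only [pvAbsorbLower]
    split
    · exact le_trans (ih _) (Nat.le_succ _)
    · simp

theorem pvAbsorbDigit_len : ∀ (chars : List String) (cs : List Char),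
    (pvAbsorbDigit chars cs).2.length ≤ cs.length := by
  intro chars cs
  induction cs generalizing chars with
  | nil => simp [pvAbsorbDigit]
  | cons c cs ih =>
    simp only [pvAbsorbDigit]
    split
    · exact le_trans (ih _) (Nat.le_succ _)
    · simp

-- A's outer while over the remaining characters; `none` = the raise in the else branch
def pvALoop : List String → List Char → Option (List String)
  | chars, [] => some chars
  | chars, c :: cs =>
    if PySem.Chars.isupper c || c == '+' || c == '-' then
      let p := pvAbsorbLower (chars ++ [String.singleton c]) cs
      pvALoop p.1 p.2
    else if PySem.Chars.isdigit c then
      let p := pvAbsorbDigit (chars ++ [String.singleton c]) cs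
      pvALoop p.1 p.2
    else if c == '(' || c == ')' then
      pvALoop (chars ++ [String.singleton c]) cs
    else none
termination_by _ cs => cs.length
decreasing_by
  · exact Nat.lt_succ_of_le (pvAbsorbLower_len _ _)
  · exact Nat.lt_succ_of_le (pvAbsorbDigit_len _ _)
  · exact Nat.lt_succ_self _

def extract_chars_py (formula : String) : List String :=
  match pvALoop [] formula.toList with
  | none => []                                  -- raise Exception('Invalid character: …')
  | some chars =>
    match chars with
    | [] => []                                  -- chars[0] raises IndexError (empty formula)
    | c0 :: _ =>
      if PySem.Str.strIsdigit c0 then []        -- raise Exception('Invalid formula')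
      else if PySem.List.count chars "(" ≠ PySem.List.count chars ")" then []  -- raise Exception('Unmatched brackets')
      else chars

-- ===== PORT B =====
-- re.match of r'[A-Z+\-][a-z]*|[0-9]+|[()]' at the start of l, hand-ported exactly:
-- the alternatives are tried left to right, '*'/'+' are greedy; on the ASCII domain
-- [A-Z]/[a-z]/[0-9] are isupper/islower/isdigit. Returns (matched token, rest).
def pvMatchToken : List Char → Option (List Char × List Char)
  | [] => none
  | c :: cs =>
    if PySem.Chars.isupper c || c == '+' || c == '-' then
      some (c :: cs.takeWhile PySem.Chars.islower, cs.dropWhile PySem.Chars.islower)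
    else if PySem.Chars.isdigit c then
      some (c :: cs.takeWhile PySem.Chars.isdigit, cs.dropWhile PySem.Chars.isdigit)
    else if c == '(' || c == ')' then some ([c], cs)
    else none

-- termination helper for pvBScan (cited in decreasing_by)
theorem pvMatchToken_rest_len {c : Char} {cs tok rest : List Char}
    (h : pvMatchToken (c :: cs) = some (tok, rest)) : rest.length ≤ cs.length := by
  simp only [pvMatchToken] at h
  split_ifs at h <;>
    simp only [Option.some.injEq, Prod.mk.injEq] at h
  · rw [← h.2]; exact (List.dropWhile_sublist _).length_le
  · rw [← h.2]; exact (List.dropWhile_sublist _).length_le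
  · rw [← h.2]

-- B's while loop: match the regex at the current position or raise; `none` = the raise
def pvBScan : List Char → Option (List String)
  | [] => some []
  | c :: cs =>
    match h : pvMatchToken (c :: cs) with
    | none => none                              -- raise Exception('Invalid character: …')
    | some (tok, rest) => (pvBScan rest).map (String.ofList tok :: ·)
termination_by l => l.length
decreasing_by exact Nat.lt_succ_of_le (pvMatchToken_rest_len h)

def extract_chars_py_alt (formula : String) : List String :=
  match pvBScan formula.toList with
  | none => []                                  -- raise Exception('Invalid character: …')
  | some chars =>
    match chars with
    | [] => []                                  -- chars[0] raises IndexError (empty formula)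
    | c0 :: _ =>
      if PySem.Str.strIsdigit c0 then []        -- raise Exception('Invalid formula')
      else if PySem.List.count chars "(" ≠ PySem.List.count chars ")" then []  -- raise Exception('Unmatched brackets')
      else chars

-- ===== PRECONDITION & SPEC =====
-- a character of the token alphabet
def pvTokenChar (c : Char) : Bool :=
  PySem.Chars.isupper c || PySem.Chars.islower c || PySem.Chars.isdigit c ||
    c == '+' || c == '-' || c == '(' || c == ')'

-- a lowercase letter may only follow a letter, '+' or '-'
def pvLowAfter (a b : Char) : Bool :=
  !PySem.Chars.islower b ||
    (PySem.Chars.isupper a || PySem.Chars.islower a || a == '+' || a == '-')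

-- Pre_ excludes exactly the inputs on which Python A raises: the empty formula
-- (IndexError on chars[0]), a character outside the token alphabet, a lowercase letter
-- not preceded by a letter/'+'/'-' (the '(' sentinel also bans a lowercase first char),
-- a formula starting with a digit ('Invalid formula'), and unmatched bracket counts.
def Pre_extract_chars_py (formula : String) : Prop :=
  formula.toList ≠ [] ∧
  formula.toList.all pvTokenChar = true ∧
  ((('(' :: formula.toList).zip formula.toList).all fun p => pvLowAfter p.1 p.2) = true ∧
  PySem.Chars.isdigit formula.toList.headI = false ∧
  formula.toList.count '(' = formula.toList.count ')'

instance (formula : String) : Decidable (Pre_extract_chars_py formula) := by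
  unfold Pre_extract_chars_py; infer_instance

def pvWitness_extract_chars_py : String := "H2O"

def Spec_extract_chars_py (formula : String) (out : List String) : Prop := out = extract_chars_py_alt formula
instance (formula : String) (out : List String) : Decidable (Spec_extract_chars_py formula out) := by unfold Spec_extract_chars_py; infer_instance

-- ===== CLAIM (what is proved, stated in full; the proofs are below) =====
def Claim_equal_extract_chars_py : Prop := ∀ (formula : String), Dom_extract_chars_py formula → Pre_extract_chars_py formula → Spec_extract_chars_py formula (extract_chars_py formula)

-- ===== LEMMAS AND PROOFS =====

theorem pvPushOfList (t : List Char) (c : Char) :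
    (String.ofList t).push c = String.ofList (t ++ [c]) :=
  String.toList_injective (by simp)

theorem pvAddLast_append (chars : List String) (s : String) (c : Char) :
    pvAddLast (chars ++ [s]) c = chars ++ [s.push c] := by
  induction chars with
  | nil => rfl
  | cons a t ih =>
    cases t with
    | nil => rfl
    | cons b r => simpa [pvAddLast] using ih

theorem pvAbsorbLower_spec (cs : List Char) : ∀ (chars : List String) (t : List Char),
    pvAbsorbLower (chars ++ [String.ofList t]) cs =
      (chars ++ [String.ofList (t ++ cs.takeWhile PySem.Chars.islower)],
       cs.dropWhile PySem.Chars.islower) := by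
  induction cs with
  | nil => simp [pvAbsorbLower]
  | cons c cs ih =>
    intro chars t
    by_cases h : PySem.Chars.islower c
    · rw [show pvAbsorbLower (chars ++ [String.ofList t]) (c :: cs)
            = pvAbsorbLower (pvAddLast (chars ++ [String.ofList t]) c) cs from by
          simp [pvAbsorbLower, h]]
      rw [pvAddLast_append, pvPushOfList, ih chars (t ++ [c])]
      simp [h]
    · simp [pvAbsorbLower, h]

theorem pvAbsorbDigit_spec (cs : List Char) : ∀ (chars : List String) (t : List Char),
    pvAbsorbDigit (chars ++ [String.ofList t]) cs =
      (chars ++ [String.ofList (t ++ cs.takeWhile PySem.Chars.isdigit)],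
       cs.dropWhile PySem.Chars.isdigit) := by
  induction cs with
  | nil => simp [pvAbsorbDigit]
  | cons c cs ih =>
    intro chars t
    by_cases h : PySem.Chars.isdigit c
    · rw [show pvAbsorbDigit (chars ++ [String.ofList t]) (c :: cs)
            = pvAbsorbDigit (pvAddLast (chars ++ [String.ofList t]) c) cs from by
          simp [pvAbsorbDigit, h]]
      rw [pvAddLast_append, pvPushOfList, ih chars (t ++ [c])]
      simp [h]
    · simp [pvAbsorbDigit, h]

theorem pvSingletonOfList (c : Char) : String.singleton c = String.ofList [c] := rfl

theorem pvScan_eq (l : List Char) : ∀ chars : List String,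
    pvALoop chars l = (pvBScan l).map (chars ++ ·) := by
  induction l using pvBScan.induct with
  | case1 => intro chars; simp [pvALoop, pvBScan]
  | case2 c cs h =>
    intro chars
    simp only [pvMatchToken] at h
    split_ifs at h with h1 h2 h3
    have hb : pvBScan (c :: cs) = none := by
      rw [pvBScan]
      split
      · rfl
      · rename_i tok' rest' heq
        rw [show pvMatchToken (c :: cs) = none from by
          simp [pvMatchToken, h1, h2, h3]] at heq
        cases heq
    rw [hb]
    rw [pvALoop, if_neg h1, if_neg h2, if_neg h3]
    rfl
  | case3 c cs tok rest h ih =>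
    intro chars
    have hb : pvBScan (c :: cs) = (pvBScan rest).map (String.ofList tok :: ·) := by
      rw [pvBScan]
      split
      · rename_i heq; rw [heq] at h; cases h
      · rename_i tok' rest' heq
        rw [heq] at h
        obtain ⟨rfl, rfl⟩ : tok' = tok ∧ rest' = rest := by
          simpa [Prod.ext_iff] using h
        rfl
    rw [hb]
    simp only [pvMatchToken] at h
    split_ifs at h with h1 h2 h3 <;>
      simp only [Option.some.injEq, Prod.mk.injEq] at h
    · obtain ⟨htok, hrest⟩ := h
      subst htok; subst hrest
      rw [pvALoop, if_pos h1]
      rw [pvSingletonOfList, pvAbsorbLower_spec cs chars [c]]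
      simp [ih, Option.map_map, Function.comp_def]
    · obtain ⟨htok, hrest⟩ := h
      subst htok; subst hrest
      rw [pvALoop, if_neg h1, if_pos h2]
      rw [pvSingletonOfList, pvAbsorbDigit_spec cs chars [c]]
      simp [ih, Option.map_map, Function.comp_def]
    · obtain ⟨htok, hrest⟩ := h
      subst htok; subst hrest
      rw [pvALoop, if_neg h1, if_neg h2, if_pos h3]
      rw [pvSingletonOfList, ih]
      simp [Option.map_map, Function.comp_def]

theorem pvMap_id (o : Option (List String)) : Option.map (fun x => x) o = o := by
  cases o <;> rfl

theorem pvPorts_eq (formula : String) :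
    extract_chars_py formula = extract_chars_py_alt formula := by
  unfold extract_chars_py extract_chars_py_alt
  rw [pvScan_eq formula.toList []]
  simp only [List.nil_append, pvMap_id]

-- ===== VERDICT (by name: the statement is the Claim_ definition above) =====
theorem extract_chars_py_spec : Claim_equal_extract_chars_py := by
  intro formula _ _
  unfold Spec_extract_chars_py
  exact pvPorts_eq formula
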